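-- pv_equiv track=rewrite | github.com/alessandragrazielle/ifpi-ads-algoritmos2020 | Vetores - exercícios/vetores_alongamento.py | pos_ou_neg
-- ===== SOURCE A (Python) =====
-- def pos_ou_neg(vetor):
--     npos = 0
--     nneg = 0
--     for i in range(len(vetor)):
--         if vetor[i] >= 0:
--             npos += 1
--         else:
--             nneg += 1
--
--     return npos, nneg
-- ===== SOURCE B (Python) =====
-- def pos_ou_neg(vetor):
--     # Sort, then binary-search for the first non-negative element:
--     # its index is the number of negatives; the rest are non-negative.
--     s = sorted(vetor)
--     lo, hi = 0, len(s)
--     while lo < hi: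
--         mid = (lo + hi) // 2
--         if s[mid] < 0:
--             lo = mid + 1
--         else:
--             hi = mid
--     return len(vetor) - lo, lo
-- ===== Notes on version B (the rewrite author's own statement) =====
-- stated objective: alternative
-- what changed: B sorts the list and binary-searches for the boundary between negatives and non-negatives, reading both counts off the boundary index, instead of scanning with two if/else counters.
import Mathlib
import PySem

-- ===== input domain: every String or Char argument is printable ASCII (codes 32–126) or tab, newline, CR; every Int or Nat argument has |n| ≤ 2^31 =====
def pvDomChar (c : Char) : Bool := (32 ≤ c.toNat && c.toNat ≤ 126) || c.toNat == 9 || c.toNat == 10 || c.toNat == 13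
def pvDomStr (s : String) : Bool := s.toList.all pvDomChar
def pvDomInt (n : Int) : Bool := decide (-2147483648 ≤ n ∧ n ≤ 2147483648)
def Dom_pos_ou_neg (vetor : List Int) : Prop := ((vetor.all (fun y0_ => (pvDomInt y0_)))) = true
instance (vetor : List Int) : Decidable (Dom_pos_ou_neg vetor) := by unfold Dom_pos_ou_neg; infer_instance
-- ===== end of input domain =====

-- B sorts the list and binary-searches for the first non-negative element, reading both counts off that boundary index (alternative algorithm; not faster).


-- ===== PORT A =====
-- A: loop over the elements keeping two counters (npos, nneg), if/else on x >= 0.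
def pos_ou_neg (vetor : List Int) : Int × Int :=
  vetor.foldl (fun (st : Int × Int) x =>
    if x ≥ 0 then (st.1 + 1, st.2) else (st.1, st.2 + 1)) (0, 0)

-- ===== PORT B =====
-- B's while-loop: binary search for the first index whose element is ≥ 0.
-- s[mid] is always in range here (lo ≤ mid < hi ≤ len), so getD is exact for Python's s[mid].
def pvBsearch (s : List Int) (lo hi : Nat) : Nat :=
  if _h : lo < hi then
    let mid := (lo + hi) / 2
    if s.getD mid 0 < 0 then pvBsearch s (mid + 1) hi else pvBsearch s lo mid
  else lo
termination_by hi - lo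
decreasing_by all_goals omega

-- B: sort, binary-search the negative/non-negative boundary, read both counts off it.
def pos_ou_neg_alt (vetor : List Int) : Int × Int :=
  let s := PySem.List.sorted vetor (fun x => x) false
  let lo := pvBsearch s 0 s.length
  ((vetor.length : Int) - (lo : Int), (lo : Int))

-- ===== PRECONDITION & SPEC =====
def Spec_pos_ou_neg (vetor : List Int) (out : Int × Int) : Prop := out = pos_ou_neg_alt vetor
instance (vetor : List Int) (out : Int × Int) : Decidable (Spec_pos_ou_neg vetor out) := by unfold Spec_pos_ou_neg; infer_instance

-- ===== CLAIM =====
def Claim_equal_pos_ou_neg : Prop := ∀ (vetor : List Int), Dom_pos_ou_neg vetor → Spec_pos_ou_neg vetor (pos_ou_neg vetor)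

-- ===== LEMMAS AND PROOFS =====
-- A's loop invariant: the fold adds (count of ≥ 0, count of < 0) to the accumulator.
theorem pos_ou_neg_foldl_inv (l : List Int) (a b : Int) :
    l.foldl (fun (st : Int × Int) x =>
      if x ≥ 0 then (st.1 + 1, st.2) else (st.1, st.2 + 1)) (a, b)
    = (a + ((l.countP (fun x => decide (0 ≤ x)) : Int)),
       b + ((l.countP (fun x => decide (x < 0)) : Int))) := by
  induction l generalizing a b with
  | nil => simp
  | cons x xs ih =>
    by_cases hx : 0 ≤ x <;>
      simp [List.foldl, hx, ih, not_le.mp] <;> ring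

-- In a sorted list, position i holds a negative element iff i is below the negative count.
theorem sorted_neg_iff (s : List Int) (hs : s.Pairwise (· ≤ ·)) (i : Nat) (hi : i < s.length) :
    (s.getD i 0 < 0 ↔ i < s.countP (fun x => decide (x < 0))) := by
  induction s generalizing i with
  | nil => simp at hi
  | cons x t ih =>
    rcases List.pairwise_cons.mp hs with ⟨hx, ht⟩
    cases i with
    | zero =>
      by_cases h0 : x < 0
      · simp [h0]
      · have hz : t.countP (fun x => decide (x < 0)) = 0 := by
          rw [List.countP_eq_zero]
          intro y hy
          simpa using not_lt.mpr (le_trans (not_lt.mp h0) (hx y hy))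
        simp [h0, hz]
    | succ j =>
      have hj : j < t.length := by simpa using hi
      by_cases h0 : x < 0
      · simpa [List.countP_cons, h0, Nat.succ_lt_succ_iff] using ih ht j hj
      · have hz : t.countP (fun x => decide (x < 0)) = 0 := by
          rw [List.countP_eq_zero]
          intro y hy
          simpa using not_lt.mpr (le_trans (not_lt.mp h0) (hx y hy))
        have hy : ¬ t.getD j 0 < 0 := by
          rw [ih ht j hj, hz]; omega
        simp only [List.getD] at hy
        simp [h0, hz, hy]

-- Binary-search correctness: with the boundary c bracketed by [lo, hi], the loop finds c.
theorem pvBsearch_eq (s : List Int) (hs : s.Pairwise (· ≤ ·)) :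
    ∀ lo hi, lo ≤ s.countP (fun x => decide (x < 0)) →
      s.countP (fun x => decide (x < 0)) ≤ hi → hi ≤ s.length →
      pvBsearch s lo hi = s.countP (fun x => decide (x < 0)) := by
  intro lo hi
  induction hn : hi - lo using Nat.strong_induction_on generalizing lo hi with
  | _ n ihn =>
    intro hlc hch hhl
    unfold pvBsearch
    by_cases h : lo < hi
    · have hm1 : lo ≤ (lo + hi) / 2 := by omega
      have hm2 : (lo + hi) / 2 < hi := by omega
      have hml : (lo + hi) / 2 < s.length := by omega
      simp only [h, dif_pos]
      by_cases hneg : s.getD ((lo + hi) / 2) 0 < 0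
      · have hc : (lo + hi) / 2 < s.countP (fun x => decide (x < 0)) :=
          (sorted_neg_iff s hs _ hml).mp hneg
        rw [if_pos hneg]
        exact ihn (hi - ((lo + hi) / 2 + 1)) (by omega) _ _ rfl (by omega) hch hhl
      · have hc : s.countP (fun x => decide (x < 0)) ≤ (lo + hi) / 2 := by
          have := (sorted_neg_iff s hs _ hml).not.mp hneg
          omega
        rw [if_neg hneg]
        exact ihn ((lo + hi) / 2 - lo) (by omega) _ _ rfl hlc hc (by omega)
    · simp only [h, dif_neg, not_false_iff]
      omega

-- ===== VERDICT =====
theorem pos_ou_neg_spec : Claim_equal_pos_ou_neg := by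
  intro vetor _
  unfold Spec_pos_ou_neg pos_ou_neg pos_ou_neg_alt
  have hperm : (PySem.List.sorted vetor (fun x => x) false).Perm vetor :=
    PySem.List.sorted_perm vetor (fun x => x) false
  have hpw : (PySem.List.sorted vetor (fun x => x) false).Pairwise (· ≤ ·) :=
    PySem.List.sorted_pairwise vetor (fun x => x)
  set s := PySem.List.sorted vetor (fun x => x) false with hsdef
  have hcnt : s.countP (fun x => decide (x < 0)) = vetor.countP (fun x => decide (x < 0)) :=
    hperm.countP_eq _
  have hlen : s.length = vetor.length := hperm.length_eq
  have hb : pvBsearch s 0 s.length = vetor.countP (fun x => decide (x < 0)) := by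
    rw [pvBsearch_eq s hpw 0 s.length (Nat.zero_le _)
      (by rw [hcnt, hlen]; exact List.countP_le_length) (le_refl _), hcnt]
  rw [pos_ou_neg_foldl_inv vetor 0 0]
  have hsum : vetor.countP (fun x => decide (0 ≤ x)) + vetor.countP (fun x => decide (x < 0))
      = vetor.length := by
    have := vetor.length_eq_countP_add_countP (fun x => decide (0 ≤ x))
    have he : vetor.countP (fun x => ¬ decide (0 ≤ x)) = vetor.countP (fun x => decide (x < 0)) := by
      apply List.countP_congr; intro y _; simp [not_le]
    omega
  simp only [hb, Prod.mk.injEq]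
  constructor <;> omega
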